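-- pv_equiv track=rewrite | github.com/HarleyQuin873/python-exercises | corsopython/SEZIONE21_ESERCIZI_DALLO_SPAZIO_PROFONDO/flip_array.py | getMinOperations
-- ===== SOURCE A (Python) =====
-- def getMinOperations(arr):
--     n=len(arr)
--     MAX_BITS=31 #perchè arr[i] < 1e9
--
--     total_ops = 0
--
--     for b in range(MAX_BITS):
--         ones = 0
--         for x in arr:
--             if(x>>b) & 1:
--                 ones += 1
--         zeros = n - ones
--         total_ops += min(ones, zeros)
--
--     return total_ops
-- ===== SOURCE B (Python) =====
-- def getMinOperations(arr):
--     def go(xs, bits):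
--         if bits == 0:
--             return 0
--         odd = sum(x & 1 for x in xs)
--         return min(odd, len(xs) - odd) + go([x >> 1 for x in xs], bits - 1)
--     return go(arr, 31)
-- ===== Notes on version B (the rewrite author's own statement) =====
-- stated objective: alternative
-- what changed: B replaces A's 31 indexed counting scans with a recursive bit-stripping pass: each level counts the odd elements (current low bit), adds min(odd, n-odd), and recurses on the whole array arithmetically shifted right by one, so no per-bit index or shift-by-b ever appears.
import Mathlib
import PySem

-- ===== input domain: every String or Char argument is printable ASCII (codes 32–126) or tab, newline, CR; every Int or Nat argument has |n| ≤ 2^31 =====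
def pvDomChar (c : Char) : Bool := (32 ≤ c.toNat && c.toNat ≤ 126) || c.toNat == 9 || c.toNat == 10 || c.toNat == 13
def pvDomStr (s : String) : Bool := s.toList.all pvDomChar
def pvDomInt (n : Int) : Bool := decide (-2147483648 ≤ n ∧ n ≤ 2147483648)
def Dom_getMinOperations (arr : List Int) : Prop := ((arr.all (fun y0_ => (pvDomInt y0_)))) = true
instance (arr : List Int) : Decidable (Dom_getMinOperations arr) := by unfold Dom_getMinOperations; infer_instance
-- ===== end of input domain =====

-- B replaces A's 31 indexed counting scans (x>>b)&1 with a recursive bit-stripping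
-- pass: each level counts odd elements, adds min(odd, n-odd), and recurses on the
-- array shifted right by one (objective: alternative; same asymptotic cost).

-- ===== PORT A =====
def getMinOperations (arr : List Int) : Int :=
  let n : Int := arr.length
  (PySem.List.pyRange 0 31 1).foldl (fun total b =>
    let ones : Int := arr.foldl (fun ones x =>
      if PySem.Int.band (x >>> b.toNat) 1 ≠ 0 then ones + 1 else ones) 0
    total + min ones (n - ones)) 0

-- ===== PORT B =====
-- go(xs, bits): odd = sum(x & 1 for x in xs); min(odd, len(xs)-odd) + go([x >> 1 ...], bits-1)
def pvGo (xs : List Int) (bits : Nat) : Int :=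
  match bits with
  | 0 => 0
  | Nat.succ bits =>
    let odd : Int := (xs.map (fun x => PySem.Int.band x 1)).sum
    min odd ((xs.length : Int) - odd) + pvGo (xs.map (fun x : Int => x >>> (1 : Nat))) bits

def getMinOperations_alt (arr : List Int) : Int := pvGo arr 31

-- ===== PRECONDITION & SPEC =====
def Spec_getMinOperations (arr : List Int) (out : Int) : Prop := out = getMinOperations_alt arr
instance (arr : List Int) (out : Int) : Decidable (Spec_getMinOperations arr out) := by unfold Spec_getMinOperations; infer_instance

-- ===== CLAIM (what is proved, stated in full; the proofs are below) =====
def Claim_equal_getMinOperations : Prop := ∀ (arr : List Int), Dom_getMinOperations arr → Spec_getMinOperations arr (getMinOperations arr)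

-- ===== LEMMAS AND PROOFS =====

-- the bit value (x >> b) & 1, shared vocabulary of the proofs
def pvBit (x : Int) (b : Nat) : Int := PySem.Int.band (x >>> b) 1

theorem pvBit_01 (x : Int) (b : Nat) : pvBit x b = 0 ∨ pvBit x b = 1 := by
  unfold pvBit
  rw [PySem.Int.band_one]
  have h1 := PySem.Int.mod_nonneg (x >>> b) (b := 2) (by omega)
  have h2 := PySem.Int.mod_lt (x >>> b) (b := 2) (by omega)
  omega

-- A's inner counting loop computes the sum of the bit values of arr at bit bi
theorem ones_eq (arr : List Int) (bi : Int) (acc : Int) :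
    arr.foldl (fun ones (x : Int) => if PySem.Int.band (x >>> bi.toNat) 1 ≠ 0 then ones + 1 else ones) acc
      = acc + (arr.map (fun x => pvBit x bi.toNat)).sum := by
  induction arr generalizing acc with
  | nil => simp
  | cons x xs ih =>
    simp only [List.foldl_cons, List.map_cons, List.sum_cons, ih]
    rcases pvBit_01 x bi.toNat with h | h
    · rw [pvBit] at h
      simp [pvBit, h]
    · rw [pvBit] at h
      simp [pvBit, h]
      ring

-- B's recursion, started on arr shifted right by k, sums the min-terms of bits k..k+bits-1
theorem pvGo_eq (bits : Nat) : ∀ (k : Nat) (arr : List Int),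
    pvGo (arr.map (fun x : Int => x >>> k)) bits
      = ((List.range bits).map (fun b =>
          min ((arr.map (fun x => pvBit x (k + b))).sum)
              ((arr.length : Int) - (arr.map (fun x => pvBit x (k + b))).sum))).sum := by
  induction bits with
  | zero => intro k arr; simp [pvGo]
  | succ bits ih =>
    intro k arr
    have hshift : (arr.map (fun x : Int => x >>> k)).map (fun x : Int => x >>> (1 : Nat))
        = arr.map (fun x : Int => x >>> (k + 1)) := by
      rw [List.map_map]
      refine List.map_congr_left fun x _ => ?_
      simp [← Int.shiftRight_add]
    have hodd : ((arr.map (fun x : Int => x >>> k)).map (fun x => PySem.Int.band x 1)).sum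
        = (arr.map (fun x => pvBit x k)).sum := by
      rw [List.map_map]; rfl
    simp only [pvGo, hshift, hodd, List.length_map, ih (k + 1) arr]
    rw [List.range_succ_eq_map]
    simp only [List.map_cons, List.sum_cons, List.map_map]
    congr 1
    refine congrArg List.sum (List.map_congr_left fun b _ => ?_)
    have : k + 1 + b = k + (b + 1) := by omega
    simp [Function.comp, this]

-- ===== VERDICT (by name: the statement is the Claim_ definition above) =====
theorem getMinOperations_spec : Claim_equal_getMinOperations := by
  intro arr _
  unfold Spec_getMinOperations getMinOperations getMinOperations_alt
  have harr : arr.map (fun x : Int => x >>> (0 : Nat)) = arr := by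
    simp
  have hB := pvGo_eq 31 0 arr
  rw [harr] at hB
  rw [hB]
  have hr : PySem.List.pyRange 0 31 1 = (List.range 31).map (fun b : Nat => (b : Int)) := by
    decide
  rw [hr, List.foldl_map]
  rw [PySem.List.foldl_add]
  simp only [zero_add]
  refine congrArg List.sum (List.map_congr_left fun b hb => ?_)
  rw [ones_eq arr (b : Int) 0]
  simp
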